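-- pv_equiv track=rewrite | github.com/Popachka/Algorithms | ИТМО Курс/Префиксный и суффиксные подстроки.py | f
-- ===== SOURCE A (Python) =====
-- from collections import defaultdict
--
-- def f(s):
--     ans = 0
--     prefix = defaultdict(int)
--     suffix = defaultdict(int)
--     for i in range(len(s)):
--         tmp_prefix = s[:i]
--         tmp_suffix = s[i:]
--         prefix[tmp_prefix] += 1
--         suffix[tmp_suffix] += 1
--
--     for i in range(len(s)):
--         for j in range(i+1, len(s)+1):
--             if prefix[s[i:j]] > 0 and suffix[s[i:j]] > 0:
--                 continue
--             ans += prefix[s[i:j]] + suffix[s[i:j]]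
--     if ans > 0:
--         ans -= 1
--     return ans
-- ===== SOURCE B (Python) =====
-- def common_prefix_len(a, b):
--     k = 0
--     for x, y in zip(a, b):
--         if x != y:
--             break
--         k += 1
--     return k
--
-- def f(s):
--     n = len(s)
--     r = s[::-1]
--     # lcp[i] = length of longest common prefix of s and s[i:]
--     lcp = [common_prefix_len(s, s[i:]) for i in range(n)]
--     # lcs[j] = length of longest common suffix of s and s[:j]
--     lcs = [common_prefix_len(r, r[n - j:]) for j in range(n + 1)]
--     ans = 0
--     for i in range(n):
--         for j in range(i + 1, n + 1):
--             k = j - i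
--             p = k <= lcp[i] and k <= n - 1   # s[i:j] is a stored prefix
--             q = k <= lcs[j]                  # s[i:j] is a stored suffix
--             if not (p and q):
--                 ans += (1 if p else 0) + (1 if q else 0)
--     return ans - 1 if ans > 0 else ans
-- ===== Notes on version B (the rewrite author's own statement) =====
-- stated objective: faster
-- what changed: Replaced the dict of all prefix/suffix slices and per-substring slice hashing by longest-common-prefix arrays (lcp of s vs s[i:], and of reversed s), so each substring's prefix/suffix test is an O(1) length comparison instead of an O(n) slice+hash.
import Mathlib
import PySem

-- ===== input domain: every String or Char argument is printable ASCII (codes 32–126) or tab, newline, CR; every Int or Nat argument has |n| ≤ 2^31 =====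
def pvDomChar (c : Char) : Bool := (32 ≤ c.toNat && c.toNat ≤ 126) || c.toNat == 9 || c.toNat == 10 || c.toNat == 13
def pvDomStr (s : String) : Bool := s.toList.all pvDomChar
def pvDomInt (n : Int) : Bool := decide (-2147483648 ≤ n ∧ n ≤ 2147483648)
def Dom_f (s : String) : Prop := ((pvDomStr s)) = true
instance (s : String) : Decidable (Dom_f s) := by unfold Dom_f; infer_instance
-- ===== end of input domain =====

-- B replaces A's dicts of prefix/suffix slices by longest-common-prefix arrays, O(n^2) instead of O(n^3).

-- ===== PORT A =====
-- strings are handled as their character lists; s[:i] = take i, s[i:] = drop i, s[i:j] = (drop i).take (j-i)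
def f (s : String) : Int :=
  let cs := s.toList
  let n := cs.length
  let pq := (List.range n).foldl
      (fun (pq : PySem.Dict (List Char) Int × PySem.Dict (List Char) Int) i =>
        (pq.1.modify (cs.take i) 0 (· + 1), pq.2.modify (cs.drop i) 0 (· + 1)))
      (PySem.Dict.empty, PySem.Dict.empty)
  let ans := (List.range n).foldl (fun acc i =>
      (List.range' (i+1) (n-i)).foldl (fun acc j =>
        let t := (cs.drop i).take (j - i)
        if pq.1.getD t 0 > 0 ∧ pq.2.getD t 0 > 0 then acc
        else acc + pq.1.getD t 0 + pq.2.getD t 0) acc) (0 : Int)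
  if ans > 0 then ans - 1 else ans

-- ===== PORT B =====
-- common_prefix_len from Source B: walk the two sequences in lockstep until a mismatch
def cpl : List Char → List Char → Nat
  | x :: xs, y :: ys => if x = y then cpl xs ys + 1 else 0
  | _, _ => 0

def f_alt (s : String) : Int :=
  let cs := s.toList
  let n := cs.length
  let r := cs.reverse
  let lcp := (List.range n).map (fun i => cpl cs (cs.drop i))
  let lcs := (List.range (n+1)).map (fun j => cpl r (r.drop (n - j)))
  let ans := (List.range n).foldl (fun acc i =>
      (List.range' (i+1) (n-i)).foldl (fun acc j =>
        let k := j - i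
        let p := k ≤ lcp.getD i 0 ∧ k ≤ n - 1
        let q := k ≤ lcs.getD j 0
        if ¬ (p ∧ q) then acc + (if p then 1 else 0) + (if q then 1 else 0)
        else acc) acc) (0 : Int)
  if ans > 0 then ans - 1 else ans

-- ===== PRECONDITION & SPEC =====
def Spec_f (s : String) (out : Int) : Prop := out = f_alt s
instance (s : String) (out : Int) : Decidable (Spec_f s out) := by unfold Spec_f; infer_instance

-- ===== CLAIM (what is proved, stated in full; the proofs are below) =====
def Claim_equal_f : Prop := ∀ (s : String), Dom_f s → Spec_f s (f s)

-- ===== LEMMAS AND PROOFS =====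

-- a predicate that can only hold at k is counted at most once over range m
theorem countP_range_unique (p : Nat → Bool) (m k : Nat)
    (h : ∀ i, i < m → p i = true → i = k) :
    (List.range m).countP p = if k < m ∧ p k = true then 1 else 0 := by
  induction m with
  | zero => simp
  | succ m ih =>
    rw [List.range_succ, List.countP_append]
    have ih' := ih (fun i hi hp => h i (by omega) hp)
    by_cases hk : k = m
    · subst hk
      have h0 : ¬ (k < k ∧ p k = true) := by omega
      rw [ih', if_neg h0]
      by_cases hp : p k = true <;> simp [hp]
    · have hpm : p m ≠ true := fun hp => hk (h m (by omega) hp).symm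
      have hiff : (k ≤ m ∧ p k = true) ↔ (k < m ∧ p k = true) := by
        constructor <;> rintro ⟨h1, h2⟩ <;> exact ⟨by omega, h2⟩
      rw [ih', List.countP_cons, List.countP_nil, if_neg hpm]
      simp [hiff]


theorem cpl_iff (a : List Char) : ∀ (b : List Char) (k : Nat), k ≤ a.length → k ≤ b.length →
    (a.take k = b.take k ↔ k ≤ cpl a b) := by
  induction a with
  | nil =>
    intro b k ha _
    have hk0 : k = 0 := by simpa using ha
    subst hk0; simp
  | cons x xs ih =>
    intro b k ha hb
    cases b with
    | nil =>
      have hk0 : k = 0 := by simpa using hb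
      subst hk0; simp
    | cons y ys =>
      cases k with
      | zero => simp
      | succ k =>
        simp only [List.take_succ_cons, cpl]
        constructor
        · intro h
          injection h with h1 h2
          subst h1
          rw [if_pos rfl]
          have := (ih ys k (by simpa using ha) (by simpa using hb)).1 h2
          omega
        · intro h
          by_cases hxy : x = y
          · subst hxy
            rw [if_pos rfl] at h
            have := (ih ys k (by simpa using ha) (by simpa using hb)).2 (by omega)
            rw [this]
          · rw [if_neg hxy] at h; omega

-- the list of all proper prefixes (lengths 0..n-1) contains t at most once: count is an indicator
theorem count_take (cs t : List Char) :
    ((List.range cs.length).map (fun i => cs.take i)).count t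
      = if t.length < cs.length ∧ cs.take t.length = t then 1 else 0 := by
  rw [List.count_eq_countP, List.countP_map]
  have h := countP_range_unique (fun i => cs.take i == t) cs.length t.length
    (fun i hi hp => by
      have hEq : cs.take i = t := by simpa using hp
      have hl : t.length = i := by rw [← hEq, List.length_take]; omega
      omega)
  simpa using h

-- the list of all nonempty suffixes (drop 0 .. drop (n-1)) contains t at most once
theorem count_drop (cs t : List Char) :
    ((List.range cs.length).map (fun i => cs.drop i)).count t
      = if cs.length - t.length < cs.length ∧ cs.drop (cs.length - t.length) = t then 1 else 0 := by
  rw [List.count_eq_countP, List.countP_map]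
  have h := countP_range_unique (fun i => cs.drop i == t) cs.length (cs.length - t.length)
    (fun i hi hp => by
      have hEq : cs.drop i = t := by simpa using hp
      have hl : t.length = cs.length - i := by rw [← hEq, List.length_drop]
      omega)
  simpa using h

-- the two double loops agree, given that the dict lookups are the prefix/suffix indicators
theorem loops_eq (cs : List Char) (pd sd : PySem.Dict (List Char) Int)
    (hp : ∀ t : List Char, pd.getD t 0
        = if t.length < cs.length ∧ cs.take t.length = t then 1 else 0)
    (hs : ∀ t : List Char, sd.getD t 0
        = if cs.length - t.length < cs.length ∧ cs.drop (cs.length - t.length) = t then 1 else 0) :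
    (List.range cs.length).foldl (fun acc i =>
      (List.range' (i+1) (cs.length - i)).foldl (fun acc j =>
        if pd.getD ((cs.drop i).take (j - i)) 0 > 0 ∧ sd.getD ((cs.drop i).take (j - i)) 0 > 0
        then acc
        else acc + pd.getD ((cs.drop i).take (j - i)) 0 + sd.getD ((cs.drop i).take (j - i)) 0)
        acc) (0 : Int)
    = (List.range cs.length).foldl (fun acc i =>
      (List.range' (i+1) (cs.length - i)).foldl (fun acc j =>
        if ¬ ((j - i ≤ ((List.range cs.length).map (fun i => cpl cs (cs.drop i))).getD i 0
                ∧ j - i ≤ cs.length - 1)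
              ∧ j - i ≤ ((List.range (cs.length+1)).map
                    (fun j => cpl cs.reverse (cs.reverse.drop (cs.length - j)))).getD j 0)
        then acc
          + (if j - i ≤ ((List.range cs.length).map (fun i => cpl cs (cs.drop i))).getD i 0
                ∧ j - i ≤ cs.length - 1 then 1 else 0)
          + (if j - i ≤ ((List.range (cs.length+1)).map
                (fun j => cpl cs.reverse (cs.reverse.drop (cs.length - j)))).getD j 0
             then 1 else 0)
        else acc) acc) (0 : Int) := by
  apply PySem.List.foldl_congr_mem
  intro acc i hi
  rw [List.mem_range] at hi
  apply PySem.List.foldl_congr_mem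
  intro acc2 j hj
  have hj' : i + 1 ≤ j ∧ j < i + 1 + (cs.length - i) := List.mem_range'_1.mp hj
  have hij : i < j := by omega
  have hjn : j ≤ cs.length := by omega
  have hlcp : ((List.range cs.length).map (fun i => cpl cs (cs.drop i))).getD i 0
      = cpl cs (cs.drop i) := by
    rw [List.getD_eq_getElem?_getD]
    simp [hi]
  have hlcs : ((List.range (cs.length+1)).map
        (fun j => cpl cs.reverse (cs.reverse.drop (cs.length - j)))).getD j 0
      = cpl cs.reverse (cs.reverse.drop (cs.length - j)) := by
    rw [List.getD_eq_getElem?_getD]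
    simp [Nat.lt_succ_of_le hjn]
  rw [hp, hs, hlcp, hlcs]
  have ht : ((cs.drop i).take (j - i)).length = j - i := by
    rw [List.length_take, List.length_drop]; omega
  rw [ht]
  set k := j - i with hk
  have hn : 0 < cs.length := by omega
  have hk1 : 0 < k := by omega
  have hPp : (k < cs.length ∧ cs.take k = (cs.drop i).take k)
      ↔ (k ≤ cpl cs (cs.drop i) ∧ k ≤ cs.length - 1) := by
    have hc := cpl_iff cs (cs.drop i) k (by omega) (by rw [List.length_drop]; omega)
    constructor
    · rintro ⟨h1, h2⟩; exact ⟨hc.1 h2, by omega⟩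
    · rintro ⟨h1, h2⟩; exact ⟨by omega, hc.2 h1⟩
  have hQq : (cs.length - k < cs.length ∧ cs.drop (cs.length - k) = (cs.drop i).take k)
      ↔ k ≤ cpl cs.reverse (cs.reverse.drop (cs.length - j)) := by
    have hc := cpl_iff cs.reverse (cs.reverse.drop (cs.length - j)) k
      (by rw [List.length_reverse]; omega)
      (by rw [List.length_drop, List.length_reverse]; omega)
    have e2 : cs.reverse.drop (cs.length - j) = (cs.take j).reverse := by
      have h2 : cs.length - (cs.length - j) = j := by omega
      rw [List.drop_reverse, h2]
    have e1 : cs.reverse.take k = (cs.drop (cs.length - k)).reverse := by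
      rw [List.take_reverse]
    have e3 : (cs.take j).reverse.take k = ((cs.drop i).take k).reverse := by
      rw [List.take_reverse]
      have hlen : (cs.take j).length - k = i := by rw [List.length_take]; omega
      rw [hlen, List.drop_take]
    have key : (cs.reverse.take k = (cs.reverse.drop (cs.length - j)).take k)
        ↔ (cs.drop (cs.length - k) = (cs.drop i).take k) := by
      rw [e1, e2, e3, List.reverse_inj]
    constructor
    · rintro ⟨_, h2⟩; exact hc.1 (key.mpr h2)
    · intro h1; exact ⟨by omega, key.mp (hc.2 h1)⟩
  by_cases hP : k ≤ cpl cs (cs.drop i) ∧ k ≤ cs.length - 1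
  · by_cases hQ : k ≤ cpl cs.reverse (cs.reverse.drop (cs.length - j))
    · have hPa := hPp.mpr hP
      have hQa := hQq.mpr hQ
      simp only [if_pos hPa, if_pos hQa]
      simp [hP, hQ]
    · have hPa := hPp.mpr hP
      have hQa : ¬ (cs.length - k < cs.length ∧ cs.drop (cs.length - k) = (cs.drop i).take k) :=
        fun h => hQ (hQq.mp h)
      simp only [if_pos hPa, if_neg hQa]
      simp [hP, hQ]
  · by_cases hQ : k ≤ cpl cs.reverse (cs.reverse.drop (cs.length - j))
    · have hPa : ¬ (k < cs.length ∧ cs.take k = (cs.drop i).take k) :=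
        fun h => hP (hPp.mp h)
      have hQa := hQq.mpr hQ
      simp only [if_neg hPa, if_pos hQa]
      simp [hP, hQ]
    · have hPa : ¬ (k < cs.length ∧ cs.take k = (cs.drop i).take k) :=
        fun h => hP (hPp.mp h)
      have hQa : ¬ (cs.length - k < cs.length ∧ cs.drop (cs.length - k) = (cs.drop i).take k) :=
        fun h => hQ (hQq.mp h)
      simp only [if_neg hPa, if_neg hQa]
      simp [hP, hQ]

-- the prefix dict lookup is a membership indicator
theorem getD_pref (cs t : List Char) :
    ((List.range cs.length).foldl
        (fun d i => PySem.Dict.modify d (cs.take i) 0 (· + 1)) PySem.Dict.empty).getD t 0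
      = if t.length < cs.length ∧ cs.take t.length = t then (1 : Int) else 0 := by
  rw [← List.foldl_map (f := fun i => cs.take i)
      (g := fun d x => PySem.Dict.modify d x 0 (· + 1))]
  rw [PySem.Dict.getD_foldl_modify_add_one]
  rw [PySem.Dict.getD_empty, zero_add, count_take]
  split_ifs <;> simp

-- the suffix dict lookup is a membership indicator
theorem getD_suff (cs t : List Char) :
    ((List.range cs.length).foldl
        (fun d i => PySem.Dict.modify d (cs.drop i) 0 (· + 1)) PySem.Dict.empty).getD t 0
      = if cs.length - t.length < cs.length ∧ cs.drop (cs.length - t.length) = t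
        then (1 : Int) else 0 := by
  rw [← List.foldl_map (f := fun i => cs.drop i)
      (g := fun d x => PySem.Dict.modify d x 0 (· + 1))]
  rw [PySem.Dict.getD_foldl_modify_add_one]
  rw [PySem.Dict.getD_empty, zero_add, count_drop]
  split_ifs <;> simp

theorem f_main (s : String) : f s = f_alt s := by
  simp only [f, f_alt]
  generalize s.toList = cs
  rw [PySem.List.foldl_prod_mk
      (f := fun (d : PySem.Dict (List Char) Int) i => d.modify (cs.take i) 0 (· + 1))
      (g := fun (d : PySem.Dict (List Char) Int) i => d.modify (cs.drop i) 0 (· + 1))]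
  dsimp only
  rw [loops_eq cs _ _ (getD_pref cs) (getD_suff cs)]

-- ===== VERDICT (by name: the statement is the Claim_ definition above) =====
theorem f_spec : Claim_equal_f := by
  intro s _
  unfold Spec_f
  exact f_main s
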